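-- pv_equiv track=rewrite | github.com/daneengman/eRecipes | Testing/Searching/ingredient_search.py | process_word
-- ===== SOURCE A (Python) =====
-- def process_word(ingredient, words):
--     dict = {}
--
--     ingredient_words = ingredient.split()
--     for word in ingredient_words:
--         dict[word.lower().strip()] = 0
--
--     punctuation = '''!()-[]{};:'"\,<>./?@#$%^&*_~'''
--
--     for word in words:
--         for c in word.lower().strip():
--             if c in punctuation:
--                 word = word.replace(c, "")
--         if(word.lower().strip() in dict):
--             dict[word.lower().strip()] += 1
--
--     return dict
-- ===== SOURCE B (Python) =====
-- def process_word(ingredient, words):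
--     punctuation = '''!()-[]{};:'"\,<>./?@#$%^&*_~'''
--
--     def clean(word):
--         return ''.join(c for c in word if c not in punctuation).lower().strip()
--
--     counts = {}
--     for word in words:
--         cleaned = clean(word)
--         counts[cleaned] = counts.get(cleaned, 0) + 1
--
--     result = {}
--     for word in ingredient.split():
--         key = word.lower().strip()
--         if key not in result:
--             result[key] = counts.get(key, 0)
--     return result
-- ===== Notes on version B (the rewrite author's own statement) =====
-- stated objective: alternative
-- what changed: Instead of A's mutate-the-word-inside-its-own-char-loop and count-only-on-match pass, B cleans each word once with a filter helper, tallies ALL cleaned words into a counts dict in one pass, and then projects the ingredient keys (lowered, first-occurrence order) onto those counts.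
import Mathlib
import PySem

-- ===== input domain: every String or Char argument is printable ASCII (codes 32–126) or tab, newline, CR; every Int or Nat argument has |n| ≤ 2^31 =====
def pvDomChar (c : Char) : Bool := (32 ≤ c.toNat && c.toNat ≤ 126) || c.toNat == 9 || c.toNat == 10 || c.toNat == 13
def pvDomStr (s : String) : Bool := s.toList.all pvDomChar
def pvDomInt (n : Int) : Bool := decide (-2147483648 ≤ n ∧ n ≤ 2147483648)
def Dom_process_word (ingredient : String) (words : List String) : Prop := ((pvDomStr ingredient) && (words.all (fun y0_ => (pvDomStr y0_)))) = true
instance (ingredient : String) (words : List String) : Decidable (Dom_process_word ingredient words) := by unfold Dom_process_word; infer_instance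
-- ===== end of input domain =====

-- B restructures A's matching pass: it cleans each word once with a filter helper, tallies
-- ALL cleaned words in one counting dict, then projects the (lowered) ingredient keys onto
-- those counts. Objective: alternative decomposition (same results; not claimed faster).

-- ===== PORT A =====
-- punctuation = '''!()-[]{};:'"\,<>./?@#$%^&*_~'''  (the \, is a literal backslash and a comma)
def pwPunct : List Char :=
  ['!', '(', ')', '-', '[', ']', '{', '}', ';', ':', '\'', '"', '\\', ',', '<', '>', '.', '/', '?', '@', '#', '$', '%', '^', '&', '*', '_', '~']

def process_word (ingredient : String) (words : List String) : List (String × Int) :=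
  let d : PySem.Dict String Int :=
    (PySem.Str.split₀ ingredient).foldl
      (fun d w => d.insert (PySem.Str.strip (PySem.Str.lower w)) 0) PySem.Dict.empty
  let d :=
    words.foldl (fun d word =>
      -- for c in word.lower().strip(): if c in punctuation: word = word.replace(c, "")
      let word := (PySem.Str.strip (PySem.Str.lower word)).toList.foldl
        (fun word c => if c ∈ pwPunct then PySem.Str.replace word (String.ofList [c]) "" else word) word
      if d.contains (PySem.Str.strip (PySem.Str.lower word)) then
        d.modify (PySem.Str.strip (PySem.Str.lower word)) 0 (· + 1)
      else d) d
  d.items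

-- ===== PORT B =====
def pwClean (word : String) : String :=
  PySem.Str.strip (PySem.Str.lower (String.ofList (word.toList.filter (fun c => !decide (c ∈ pwPunct)))))

def process_word_alt (ingredient : String) (words : List String) : List (String × Int) :=
  let counts : PySem.Dict String Int :=
    words.foldl (fun d word => d.insert (pwClean word) (d.getD (pwClean word) 0 + 1)) PySem.Dict.empty
  let result : PySem.Dict String Int :=
    (PySem.Str.split₀ ingredient).foldl (fun r word =>
      let key := PySem.Str.strip (PySem.Str.lower word)
      if r.contains key then r else r.insert key (counts.getD key 0)) PySem.Dict.empty
  result.items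

-- ===== PRECONDITION & SPEC =====
def Spec_process_word (ingredient : String) (words : List String) (out : List (String × Int)) : Prop := out = process_word_alt ingredient words
instance (ingredient : String) (words : List String) (out : List (String × Int)) : Decidable (Spec_process_word ingredient words out) := by unfold Spec_process_word; infer_instance

-- ===== CLAIM (what is proved, stated in full; the proofs are below) =====
def Claim_equal_process_word : Prop := ∀ (ingredient : String) (words : List String), Dom_process_word ingredient words → Spec_process_word ingredient words (process_word ingredient words)

-- ===== LEMMAS AND PROOFS =====

-- A's word.replace(c, "") with a single-char pattern is a filter.
theorem pw_replace_go_single (c : Char) :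
    ∀ (fuel : Nat) (l acc : List Char), l.length ≤ fuel →
      PySem.Chars.replace.go [c] [] fuel l acc = acc.reverse ++ l.filter (· ≠ c) := by
  intro fuel
  induction fuel with
  | zero =>
    intro l acc h
    rw [List.length_eq_zero_iff.mp (Nat.le_zero.mp h)]
    simp [PySem.Chars.replace.go]
  | succ n ih =>
    intro l acc h
    cases l with
    | nil => simp [PySem.Chars.replace.go]
    | cons x t =>
      simp only [PySem.Chars.replace.go]
      by_cases hx : x = c
      · subst hx
        rw [if_pos (by simp [List.isPrefixOf])]
        simp only [List.length_singleton, List.drop_succ_cons, List.drop_zero, List.reverse_nil,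
          List.nil_append]
        rw [ih t acc (by simpa using Nat.le_of_succ_le_succ h)]
        simp
      · rw [if_neg (by simp [List.isPrefixOf]; exact fun hh => hx (by cases hh; rfl))]
        rw [ih t (x :: acc) (by simpa using Nat.le_of_succ_le_succ h)]
        simp [hx]

theorem pw_replace_single (s : String) (c : Char) :
    (PySem.Str.replace s (String.ofList [c]) "").toList = s.toList.filter (· ≠ c) := by
  simp only [PySem.Str.toList_replace]
  rw [show (String.ofList [c]).toList = [c] by simp, show ("" : String).toList = [] by rfl]
  rw [PySem.Chars.replace]
  simp only [List.isEmpty_cons, if_false, Bool.false_eq_true]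
  exact pw_replace_go_single c s.toList.length s.toList [] le_rfl

-- A's char loop removes exactly the punctuation chars that occur in the iterated string.
theorem pw_foldA_toList (cs : List Char) : ∀ (s : String),
    (cs.foldl (fun word c => if c ∈ pwPunct then PySem.Str.replace word (String.ofList [c]) "" else word) s).toList
      = s.toList.filter (fun ch => !(decide (ch ∈ pwPunct) && decide (ch ∈ cs))) := by
  induction cs with
  | nil => intro s; simp
  | cons c cs ih =>
    intro s
    simp only [List.foldl_cons]
    by_cases hc : c ∈ pwPunct
    · rw [if_pos hc, ih, pw_replace_single, List.filter_filter]
      apply List.filter_congr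
      intro ch _
      by_cases h1 : ch = c <;> by_cases h2 : ch ∈ pwPunct <;> by_cases h3 : ch ∈ cs <;> simp_all
    · rw [if_neg hc, ih]
      apply List.filter_congr
      intro ch _
      by_cases h1 : ch = c <;> by_cases h2 : ch ∈ pwPunct <;> by_cases h3 : ch ∈ cs <;> simp_all

theorem pw_mem_dropWhile {p : Char → Bool} {l : List Char} {c : Char} (hc : c ∈ l) (hs : p c = false) :
    c ∈ List.dropWhile p l := by
  induction l with
  | nil => cases hc
  | cons x t ih =>
    rw [List.dropWhile_cons]
    by_cases hx : p x = true
    · simp only [hx, if_true]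
      rcases List.mem_cons.mp hc with rfl | h
      · rw [hs] at hx; cases hx
      · exact ih h
    · simp only [hx]
      exact hc

-- a non-whitespace char of l survives strip
theorem pw_mem_strip (l : List Char) (c : Char) (hc : c ∈ l) (hs : PySem.Chars.isspace c = false) :
    c ∈ PySem.Chars.strip l := by
  rw [PySem.Chars.strip, PySem.Chars.rstrip, PySem.Chars.lstrip]
  rw [List.mem_reverse]
  exact pw_mem_dropWhile (by rw [List.mem_reverse]; exact pw_mem_dropWhile hc hs) hs

theorem pw_punct_lower (c : Char) (h : c ∈ pwPunct) : PySem.Chars.lowerChar c = c := by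
  fin_cases h <;> decide

theorem pw_punct_not_space (c : Char) (h : c ∈ pwPunct) : PySem.Chars.isspace c = false := by
  fin_cases h <;> decide

-- the key A computes from its mutated word equals B's helper pwClean
theorem pw_cleanA_eq (w : String) :
    PySem.Str.strip (PySem.Str.lower
      ((PySem.Str.strip (PySem.Str.lower w)).toList.foldl
        (fun word c => if c ∈ pwPunct then PySem.Str.replace word (String.ofList [c]) "" else word) w))
      = pwClean w := by
  rw [← String.toList_inj]
  simp only [pwClean, PySem.Str.toList_strip, PySem.Str.toList_lower, String.toList_ofList]
  rw [pw_foldA_toList]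
  congr 2
  apply List.filter_congr
  intro ch hch
  by_cases hP : ch ∈ pwPunct
  · have hcs : ch ∈ PySem.Chars.strip (PySem.Chars.lower w.toList) := by
      apply pw_mem_strip _ _ _ (pw_punct_not_space ch hP)
      rw [PySem.Chars.lower]
      exact List.mem_map.mpr ⟨ch, hch, pw_punct_lower ch hP⟩
    simp [hP, hcs]
  · simp [hP]

-- A's seed loop: every stored value is 0
theorem pw_seed_getD (key : String → String) :
    ∀ (l : List String) (d : PySem.Dict String Int) (k : String), d.getD k 0 = 0 →
      (l.foldl (fun d w => d.insert (key w) 0) d).getD k 0 = 0 := by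
  intro l
  induction l with
  | nil => intro d k h; exact h
  | cons w t ih =>
    intro d k h
    simp only [List.foldl_cons]
    exact ih _ _ (by rw [PySem.Dict.getD_insert]; split <;> simp [h])

-- A's counting loop keeps the key list
theorem pwA_keys (cl : String → String) :
    ∀ (l : List String) (d : PySem.Dict String Int),
      (l.foldl (fun d w => if d.contains (cl w) then d.modify (cl w) 0 (· + 1) else d) d).keys = d.keys := by
  intro l
  induction l with
  | nil => intro d; rfl
  | cons w t ih =>
    intro d
    simp only [List.foldl_cons]
    by_cases h : d.contains (cl w) = true
    · rw [if_pos h, ih, PySem.Dict.keys_modify]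
      exact PySem.Dict.keys_insert_of_contains _ _ h
    · rw [if_neg h]; exact ih d

-- A's counting loop adds, to each key present, the number of words cleaning to it
theorem pwA_getD (cl : String → String) :
    ∀ (l : List String) (d : PySem.Dict String Int) (k : String), d.contains k = true →
      (l.foldl (fun d w => if d.contains (cl w) then d.modify (cl w) 0 (· + 1) else d) d).getD k 0
        = d.getD k 0 + ((l.map cl).count k : Int) := by
  intro l
  induction l with
  | nil => intro d k _; simp
  | cons w t ih =>
    intro d k hk
    simp only [List.foldl_cons, List.map_cons, List.count_cons]
    by_cases hw : cl w = k
    · rw [hw, if_pos hk, ih _ _ (by simp [PySem.Dict.contains_modify, hk]),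
        PySem.Dict.getD_modify, if_pos rfl]
      simp
      ring
    · by_cases h : d.contains (cl w) = true
      · rw [if_pos h, ih _ _ (by simp [PySem.Dict.contains_modify, hk]),
          PySem.Dict.getD_modify, if_neg (fun hh => hw hh.symm)]
        simp [hw, beq_iff_eq]
      · rw [if_neg h, ih _ _ hk]
        simp [beq_iff_eq, hw]

-- B's seed-if-absent loop: the keys are the Set.update of the mapped keys
theorem pwB_keys (key : String → String) (g : String → Int) :
    ∀ (l : List String) (r : PySem.Dict String Int),
      (l.foldl (fun r w => if r.contains (key w) then r else r.insert (key w) (g (key w))) r).keys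
        = PySem.Set.update r.keys (l.map key) := by
  intro l
  induction l with
  | nil => intro r; rfl
  | cons w t ih =>
    intro r
    simp only [List.foldl_cons, List.map_cons, PySem.Set.update_cons]
    by_cases h : r.contains (key w) = true
    · rw [if_pos h, ih, PySem.Set.add_of_mem ((PySem.Dict.contains_iff_mem_keys _ _).mp h)]
    · rw [if_neg h, ih, PySem.Dict.keys_insert_of_not_contains _ _ (Bool.not_eq_true _ ▸ eq_false_of_ne_true h),
        PySem.Set.add_of_not_mem (fun hm => h ((PySem.Dict.contains_iff_mem_keys _ _).mpr hm))]

-- contained keys keep their value through B's loop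
theorem pwB_getD_kept (key : String → String) (g : String → Int) :
    ∀ (l : List String) (r : PySem.Dict String Int) (k : String), r.contains k = true →
      (l.foldl (fun r w => if r.contains (key w) then r else r.insert (key w) (g (key w))) r).getD k 0
        = r.getD k 0 := by
  intro l
  induction l with
  | nil => intro r k _; rfl
  | cons w t ih =>
    intro r k hk
    simp only [List.foldl_cons]
    by_cases h : r.contains (key w) = true
    · rw [if_pos h, ih _ _ hk]
    · have hne : k ≠ key w := fun he => h (he ▸ hk)
      rw [if_neg h, ih _ _ (by simp [PySem.Dict.contains_insert, hk]),
        PySem.Dict.getD_insert, if_neg hne]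


-- a fresh key gets value g k in B's loop
theorem pwB_getD_new (key : String → String) (g : String → Int) :
    ∀ (l : List String) (r : PySem.Dict String Int) (k : String), r.contains k = false →
      k ∈ l.map key →
      (l.foldl (fun r w => if r.contains (key w) then r else r.insert (key w) (g (key w))) r).getD k 0
        = g k := by
  intro l
  induction l with
  | nil => intro r k _ hm; cases hm
  | cons w t ih =>
    intro r k hk hm
    simp only [List.foldl_cons]
    by_cases hw : key w = k
    · rw [hw, if_neg (by simp [hk])]
      rw [pwB_getD_kept key g t _ _ (by simp),
        PySem.Dict.getD_insert, if_pos rfl]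
    · have hm' : k ∈ t.map key := by
        rcases List.mem_map.mp hm with ⟨a, ha, hak⟩
        rcases List.mem_cons.mp ha with rfl | hat
        · exact absurd hak hw
        · exact List.mem_map.mpr ⟨a, hat, hak⟩
      by_cases h : r.contains (key w) = true
      · rw [if_pos h]; exact ih _ _ hk hm'
      · rw [if_neg h]
        apply ih _ _ _ hm'
        simp [PySem.Dict.contains_insert, hk]
        exact fun hh => hw hh.symm

-- ===== VERDICT (by name: the statement is the Claim_ definition above) =====
theorem process_word_spec : Claim_equal_process_word := by
  intro ing words _
  unfold Spec_process_word
  show process_word ing words = process_word_alt ing words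
  unfold process_word process_word_alt
  simp only []
  -- names
  set key : String → String := fun w => PySem.Str.strip (PySem.Str.lower w) with hkey
  set ks : List String := PySem.Str.split₀ ing with hks
  set d0 : PySem.Dict String Int :=
    ks.foldl (fun d w => d.insert (key w) 0) PySem.Dict.empty with hd0
  set counts : PySem.Dict String Int :=
    words.foldl (fun d word => d.insert (pwClean word) (d.getD (pwClean word) 0 + 1)) PySem.Dict.empty with hcounts
  -- A's word loop, after the per-word char loop is resolved into pwClean
  have hstep : words.foldl (fun d word =>
      let word := (PySem.Str.strip (PySem.Str.lower word)).toList.foldl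
        (fun word c => if c ∈ pwPunct then PySem.Str.replace word (String.ofList [c]) "" else word) word
      if d.contains (PySem.Str.strip (PySem.Str.lower word)) then
        d.modify (PySem.Str.strip (PySem.Str.lower word)) 0 (· + 1)
      else d) d0
    = words.foldl (fun d w => if d.contains (pwClean w) then d.modify (pwClean w) 0 (· + 1) else d) d0 := by
    apply PySem.List.foldl_congr_mem
    intro d w _
    simp only [pw_cleanA_eq w]
  rw [hstep]
  -- keys on both sides
  have hd0keys : d0.keys = PySem.Set.ofList (ks.map key) := by
    rw [hd0, PySem.Dict.keys_foldl_insert_key ks key (fun _ _ => 0), PySem.Dict.keys_empty,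
      PySem.Set.update_nil_left]
  have hAkeys : (words.foldl (fun d w => if d.contains (pwClean w) then d.modify (pwClean w) 0 (· + 1) else d) d0).keys
      = PySem.Set.ofList (ks.map key) := by
    rw [pwA_keys, hd0keys]
  have hBkeys : (ks.foldl (fun r w => if r.contains (key w) then r else r.insert (key w) (counts.getD (key w) 0)) PySem.Dict.empty).keys
      = PySem.Set.ofList (ks.map key) := by
    rw [pwB_keys key (fun k => counts.getD k 0), PySem.Dict.keys_empty, PySem.Set.update_nil_left]
  -- items on both sides
  rw [PySem.Dict.items_eq_map_keys _ (by rw [hAkeys]; exact PySem.Set.nodup_ofList _) 0,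
    PySem.Dict.items_eq_map_keys _ (by rw [hBkeys]; exact PySem.Set.nodup_ofList _) 0,
    hAkeys, hBkeys]
  apply List.map_congr_left
  intro k hkS
  have hkmem : k ∈ ks.map key := (PySem.Set.mem_ofList _ _).mp hkS
  have hcont0 : d0.contains k = true := by
    rw [PySem.Dict.contains_iff_mem_keys, hd0keys]
    exact hkS
  have hA : (words.foldl (fun d w => if d.contains (pwClean w) then d.modify (pwClean w) 0 (· + 1) else d) d0).getD k 0
      = ((words.map pwClean).count k : Int) := by
    rw [pwA_getD pwClean words d0 k hcont0,
      pw_seed_getD key ks PySem.Dict.empty k (PySem.Dict.getD_empty k 0)]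
    ring
  have hfold : (words.map pwClean).foldl (fun (d : PySem.Dict String Int) x => d.insert x (d.getD x 0 + 1)) PySem.Dict.empty = counts := by
    rw [hcounts, List.foldl_map]
  have hcountsk : counts.getD k 0 = ((words.map pwClean).count k : Int) := by
    rw [← hfold, PySem.Dict.getD_foldl_insert_add_one, PySem.Dict.getD_empty]
    simp [List.count]
  have hB : (ks.foldl (fun r w => if r.contains (key w) then r else r.insert (key w) (counts.getD (key w) 0)) PySem.Dict.empty).getD k 0
      = ((words.map pwClean).count k : Int) := by
    rw [pwB_getD_new key (fun k => counts.getD k 0) ks PySem.Dict.empty k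
      (PySem.Dict.contains_empty k) hkmem]
    exact hcountsk
  rw [hA, hB]
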